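-- pv_equiv track=rewrite | github.com/RacsoTims/python | euler/euler_16.py | calculate_nthPower
-- ===== SOURCE A (Python) =====
-- def calculate_nthPower(base, power):
--     if power == 0:
--         return 1
--     elif power == 1:
--         return base
--     else:
--         current = base
--         n = 2
--         while n <= power:
--             current = multiplication(current, base)
--             n += 1
--     return current
--
-- def multiplication(current, factor):
--     digits = [x for x in str(current)]
--     digits_new = []
--     carry = [0]
--     iteration = 0
--
--     for digit in digits[::-1]:
--
--         temp = factor * int(digit)
--         if temp + carry[0] >= 10 and iteration != len(digits) - 1:
--             carry_units = carry[0] % 10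
--             carry_remaining_digit = int((carry[0] - carry_units) / 10)
--
--             digit_new = (temp + carry_units) % 10
--             digits_new.insert(0, digit_new)
--
--             carry_over = int((temp + carry_units - digit_new) / 10)
--             carry[0] = carry_over + carry_remaining_digit
--
--         elif iteration == len(digits) - 1:
--             digit_new = temp + carry[0]
--             digits_new.insert(0, digit_new)
--
--         elif temp + carry[0] <= 9:
--             digits_new.insert(0, temp+carry[0])
--             carry[0] = 0
--
--         iteration += 1
--     return int("".join(list(map(str, digits_new))))
-- ===== SOURCE B (Python) =====
-- def calculate_nthPower(base, power):
--     # Exponentiation by squaring: O(log power) multiplications instead of A's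
--     # digit-by-digit schoolbook multiplication repeated (power-1) times.
--     if power == 0:
--         return 1
--     if power < 2:
--         return base
--     result = 1
--     b = base
--     p = power
--     while p > 0:
--         if p % 2 == 1:
--             result *= b
--         b *= b
--         p //= 2
--     return result
-- ===== Notes on version B (the rewrite author's own statement) =====
-- stated objective: faster
-- what changed: Replaces A's chain of (power-1) string-based schoolbook digit multiplications with exponentiation by squaring over the bits of the exponent (plain machine multiplication), keeping A's power==0 -> 1 and power<2 -> base behaviour; Pre_ excludes only base<0 with power>=2, where A raises ValueError.
import Mathlib
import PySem

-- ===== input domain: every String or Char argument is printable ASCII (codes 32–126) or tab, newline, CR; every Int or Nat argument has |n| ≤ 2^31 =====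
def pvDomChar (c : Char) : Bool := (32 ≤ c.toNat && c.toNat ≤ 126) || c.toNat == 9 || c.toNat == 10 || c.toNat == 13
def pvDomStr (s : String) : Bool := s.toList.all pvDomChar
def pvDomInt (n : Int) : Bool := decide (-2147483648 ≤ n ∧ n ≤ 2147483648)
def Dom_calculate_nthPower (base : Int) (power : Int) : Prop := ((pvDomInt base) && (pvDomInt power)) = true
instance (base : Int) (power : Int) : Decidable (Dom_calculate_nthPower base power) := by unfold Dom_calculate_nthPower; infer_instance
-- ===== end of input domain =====

-- B replaces A's chain of (power-1) schoolbook string/digit multiplications by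
-- exponentiation by squaring over the bits of the exponent (objective: faster).

-- ===== PORT A =====

-- hand port of Python's int(s): exact for the nonempty all-ASCII-digit strings that
-- "".join(map(str, digits_new)) produces on every input admitted by Pre_ below
-- (the general int(s) primitive is PySem.Int.ofChars?; it is used for int(digit) below).
def pyIntOfDigits (cs : List Char) : Int :=
  cs.foldl (fun a c => 10 * a + ((c.toNat : Int) - 48)) 0

def multiplicationP (current factor : Int) : Int :=
  let digits : List Char := PySem.Int.toChars current  -- [x for x in str(current)]
  let st :=
    (((PySem.List.slice? digits none none (-1)).getD []).foldl  -- for digit in digits[::-1]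
      (fun (st : List Int × Int × Int) (digit : Char) =>
        let digits_new := st.1
        let carry := st.2.1
        let iteration := st.2.2
        -- int(digit): PySem.Int.ofChars? of the one-char string; none = ValueError (excluded by Pre_)
        let temp := factor * ((PySem.Int.ofChars? [digit]).getD 0)
        if 10 ≤ temp + carry ∧ iteration ≠ PySem.Chars.len digits - 1 then
          let carry_units := PySem.Int.mod carry 10
          let carry_remaining_digit := PySem.Int.truncdiv (carry - carry_units) 10  -- int((…)/10)
          let digit_new := PySem.Int.mod (temp + carry_units) 10
          let carry_over := PySem.Int.truncdiv (temp + carry_units - digit_new) 10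
          (PySem.List.insert digits_new 0 digit_new, carry_over + carry_remaining_digit, iteration + 1)
        else if iteration = PySem.Chars.len digits - 1 then
          (PySem.List.insert digits_new 0 (temp + carry), carry, iteration + 1)
        else if temp + carry ≤ 9 then
          (PySem.List.insert digits_new 0 (temp + carry), (0 : Int), iteration + 1)
        else (digits_new, carry, iteration + 1))
      ([], 0, 0))
  -- int("".join(list(map(str, digits_new))))
  pyIntOfDigits (PySem.Chars.join [] (st.1.map PySem.Int.toChars))

def calcWhile (base power current n : Int) : Int :=
  if _h : n ≤ power then calcWhile base power (multiplicationP current base) (n + 1) else current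
termination_by (power + 1 - n).toNat
decreasing_by omega

def calculate_nthPower (base : Int) (power : Int) : Int :=
  if power = 0 then 1
  else if power = 1 then base
  else calcWhile base power base 2

-- ===== PORT B =====

def powLoop (result b p : Int) : Int :=
  if _h : 0 < p then
    powLoop (if PySem.Int.mod p 2 = 1 then result * b else result) (b * b) (PySem.Int.floordiv p 2)
  else result
termination_by p.toNat
decreasing_by
  rw [PySem.Int.floordiv_eq_ediv_of_pos (by omega)]
  omega

def calculate_nthPower_alt (base : Int) (power : Int) : Int :=
  if power = 0 then 1
  else if power < 2 then base
  else powLoop 1 base power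

-- ===== PRECONDITION & SPEC =====

-- Pre_ excludes exactly base < 0 with power ≥ 2: there A raises ValueError
-- (int('-') on the sign character of str(current)); A returns on everything else.
def Pre_calculate_nthPower (base : Int) (power : Int) : Prop := power < 2 ∨ 0 ≤ base
instance (base : Int) (power : Int) : Decidable (Pre_calculate_nthPower base power) := by
  unfold Pre_calculate_nthPower; infer_instance

def pvWitness_calculate_nthPower : Int × Int := (3, 4)

def Spec_calculate_nthPower (base : Int) (power : Int) (out : Int) : Prop :=
  out = calculate_nthPower_alt base power
instance (base : Int) (power : Int) (out : Int) : Decidable (Spec_calculate_nthPower base power out) := by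
  unfold Spec_calculate_nthPower; infer_instance

-- ===== CLAIM (what is proved, stated in full; the proofs are below) =====
def Claim_equal_calculate_nthPower : Prop := ∀ (base : Int) (power : Int), Dom_calculate_nthPower base power → Pre_calculate_nthPower base power → Spec_calculate_nthPower base power (calculate_nthPower base power)

-- ===== LEMMAS AND PROOFS =====

-- decimal digit characters of n, most significant first (spec for Nat.toDigits 10)
def rep10 (n : Nat) : List Char :=
  if n < 10 then [Nat.digitChar n]
  else rep10 (n / 10) ++ [Nat.digitChar (n % 10)]
termination_by n
decreasing_by omega

theorem toDigitsCore_succ (f n : Nat) (acc : List Char) :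
    Nat.toDigitsCore 10 (f + 1) n acc =
      if n / 10 = 0 then (n % 10).digitChar :: acc
      else Nat.toDigitsCore 10 f (n / 10) ((n % 10).digitChar :: acc) := rfl

theorem toDigitsCore_eq_rep10 (f : Nat) : ∀ (n : Nat) (acc : List Char), n < f →
    Nat.toDigitsCore 10 f n acc = rep10 n ++ acc := by
  induction f with
  | zero => intro n acc h; omega
  | succ f ih =>
    intro n acc h
    rw [toDigitsCore_succ]
    by_cases h10 : n / 10 = 0
    · have hn : n < 10 := by omega
      rw [rep10]
      simp [hn, h10, Nat.mod_eq_of_lt hn]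
    · have hn : ¬ n < 10 := by omega
      rw [if_neg h10, ih (n / 10) _ (by omega)]
      conv_rhs => rw [rep10]
      simp [hn]

theorem toChars_nonneg (c : Int) (h : 0 ≤ c) : PySem.Int.toChars c = rep10 c.toNat := by
  have hnl : ¬ c < 0 := by omega
  simp only [PySem.Int.toChars, hnl, if_false, Nat.toDigits]
  rw [toDigitsCore_eq_rep10 _ _ _ (by omega)]
  simp

theorem ofChars_digitChar (k : Nat) (h : k < 10) :
    (PySem.Int.ofChars? [Nat.digitChar k]).getD 0 = (k : Int) := by
  interval_cases k <;> decide

theorem toNat_digitChar (k : Nat) (h : k < 10) : (Nat.digitChar k).toNat = k + 48 := by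
  interval_cases k <;> decide

theorem rep10_ne_nil (n : Nat) : rep10 n ≠ [] := by
  rw [rep10]; split <;> simp

theorem rep10_good (n : Nat) : ∀ c ∈ rep10 n, ∃ k, k < 10 ∧ c = Nat.digitChar k := by
  induction n using Nat.strong_induction_on with
  | _ n ih =>
    rw [rep10]
    split
    · next hn => intro c hc; simp at hc; exact ⟨n, hn, hc⟩
    · next hn =>
      intro c hc
      simp at hc
      rcases hc with hc | hc
      · exact ih (n / 10) (by omega) c hc
      · exact ⟨n % 10, by omega, hc⟩

-- the digit value seen by the loop
def dval (c : Char) : Int := (PySem.Int.ofChars? [c]).getD 0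

theorem dval_digitChar (k : Nat) (h : k < 10) : dval (Nat.digitChar k) = (k : Int) :=
  ofChars_digitChar k h

-- little-endian value of a digit-char list
def valLE : List Char → Int
  | [] => 0
  | c :: cs => dval c + 10 * valLE cs

theorem valLE_reverse_rep10 (n : Nat) : valLE (rep10 n).reverse = (n : Int) := by
  induction n using Nat.strong_induction_on with
  | _ n ih =>
    rw [rep10]
    split
    · next hn =>
      simp [valLE, dval_digitChar n hn]
    · next hn =>
      have hv : valLE ((rep10 (n / 10) ++ [Nat.digitChar (n % 10)]).reverse)
          = dval (Nat.digitChar (n % 10)) + 10 * valLE (rep10 (n / 10)).reverse := by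
        simp [valLE]
      rw [hv, ih (n / 10) (by omega), dval_digitChar (n % 10) (by omega)]
      push_cast
      omega

theorem pyInt_rep10 (n : Nat) : pyIntOfDigits (rep10 n) = (n : Int) := by
  induction n using Nat.strong_induction_on with
  | _ n ih =>
    rw [rep10]
    split
    · next hn =>
      have := toNat_digitChar n hn
      simp [pyIntOfDigits, this]
    · next hn =>
      have hfold : pyIntOfDigits (rep10 (n / 10) ++ [Nat.digitChar (n % 10)])
          = 10 * pyIntOfDigits (rep10 (n / 10)) + (((Nat.digitChar (n % 10)).toNat : Int) - 48) := by
        simp [pyIntOfDigits, List.foldl_append]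
      rw [hfold, ih (n / 10) (by omega), toNat_digitChar (n % 10) (by omega)]
      push_cast
      omega

-- generic base-10 accumulator shift
theorem foldl_digit_shift {α : Type} (g : α → Int) (xs : List α) (a : Int) :
    xs.foldl (fun acc x => 10 * acc + g x) a
      = a * 10 ^ xs.length + xs.foldl (fun acc x => 10 * acc + g x) 0 := by
  induction xs generalizing a with
  | nil => simp
  | cons x xs ih =>
    simp only [List.foldl_cons, List.length_cons]
    rw [ih (10 * a + g x), ih (10 * 0 + g x)]
    ring

-- the loop body of multiplicationP, named for the proofs (identical text)
def stepA (factor K : Int) (st : List Int × Int × Int) (digit : Char) : List Int × Int × Int :=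
  let digits_new := st.1
  let carry := st.2.1
  let iteration := st.2.2
  let temp := factor * ((PySem.Int.ofChars? [digit]).getD 0)
  if 10 ≤ temp + carry ∧ iteration ≠ K - 1 then
    let carry_units := PySem.Int.mod carry 10
    let carry_remaining_digit := PySem.Int.truncdiv (carry - carry_units) 10
    let digit_new := PySem.Int.mod (temp + carry_units) 10
    let carry_over := PySem.Int.truncdiv (temp + carry_units - digit_new) 10
    (PySem.List.insert digits_new 0 digit_new, carry_over + carry_remaining_digit, iteration + 1)
  else if iteration = K - 1 then
    (PySem.List.insert digits_new 0 (temp + carry), carry, iteration + 1)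
  else if temp + carry ≤ 9 then
    (PySem.List.insert digits_new 0 (temp + carry), (0 : Int), iteration + 1)
  else (digits_new, carry, iteration + 1)

theorem multiplicationP_eq (current factor : Int) :
    multiplicationP current factor =
      pyIntOfDigits (PySem.Chars.join []
        (((((PySem.List.slice? (PySem.Int.toChars current) none none (-1)).getD []).foldl
            (stepA factor (PySem.Chars.len (PySem.Int.toChars current))) ([], 0, 0)).1).map
          PySem.Int.toChars)) := rfl

theorem truncdiv10_nonneg (x : Int) (h : 0 ≤ x) : PySem.Int.truncdiv x 10 = x / 10 := by
  simp [PySem.Int.truncdiv, Int.tdiv_eq_ediv, h]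

-- the result digits of the loop, most significant first
def resF (f : Int) : List Char → Int → List Int
  | [], _ => []
  | [d], c => [f * dval d + c]
  | d :: e :: rest, c =>
      resF f (e :: rest) ((f * dval d + c) / 10) ++ [(f * dval d + c) % 10]

theorem stepA_mid (f K : Int) (d : Char)
    (hv0 : 0 ≤ f * dval d)
    (dn : List Int) (carry iter : Int) (hc : 0 ≤ carry) (hiter : iter ≠ K - 1) :
    stepA f K (dn, carry, iter) d
      = ((f * dval d + carry) % 10 :: dn, ((f * dval d + carry) / 10, iter + 1)) := by
  simp only [stepA, dval, PySem.List.insert_zero] at hv0 ⊢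
  set V : Int := (PySem.Int.ofChars? [d]).getD 0 with hV
  simp only [PySem.Int.mod_eq_emod_of_pos (show (0 : Int) < 10 by norm_num)]
  rw [truncdiv10_nonneg (carry - carry % 10) (by omega)]
  rw [truncdiv10_nonneg (f * V + carry % 10 - (f * V + carry % 10) % 10) (by omega)]
  by_cases ht : 10 ≤ f * V + carry
  · rw [if_pos ⟨ht, hiter⟩]
    simp only [Prod.mk.injEq, List.cons.injEq]
    exact ⟨⟨by omega, trivial⟩, by omega, trivial⟩
  · rw [if_neg (by intro hcon; exact ht hcon.1), if_neg hiter,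
        if_pos (show f * V + carry ≤ 9 by omega)]
    simp only [Prod.mk.injEq, List.cons.injEq]
    exact ⟨⟨by omega, trivial⟩, by omega, trivial⟩

theorem stepA_last (f K : Int) (d : Char) (dn : List Int) (carry : Int) :
    stepA f K (dn, carry, K - 1) d
      = ((f * dval d + carry) :: dn, (carry, K - 1 + 1)) := by
  simp only [stepA, PySem.List.insert_zero]
  simp [dval]

theorem loop_eq (f K : Int) (hf : 0 ≤ f) :
    ∀ (ds : List Char), ds ≠ [] → (∀ c ∈ ds, ∃ k, k < 10 ∧ c = Nat.digitChar k) →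
    ∀ (dn : List Int) (carry iter : Int), 0 ≤ carry → iter = K - (ds.length : Int) →
    (ds.foldl (stepA f K) (dn, carry, iter)).1 = resF f ds carry ++ dn := by
  intro ds
  induction ds with
  | nil => intro h; exact absurd rfl h
  | cons d rest ih =>
    intro _ hg dn carry iter hc hiter
    rcases rest with _ | ⟨e, t⟩
    · have hiter' : iter = K - 1 := by
        simp only [List.length_cons, List.length_nil] at hiter
        push_cast at hiter
        omega
      subst hiter'
      rw [List.foldl_cons, stepA_last, List.foldl_nil]
      simp [resF]
    · have hne : iter ≠ K - 1 := by
        simp only [List.length_cons] at hiter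
        push_cast at hiter
        omega
      have hd := hg d (by simp)
      have hv0 : 0 ≤ f * dval d := by
        obtain ⟨k, hk, rfl⟩ := hd
        rw [dval_digitChar k hk]
        positivity
      rw [List.foldl_cons, stepA_mid f K d hv0 dn carry iter hc hne]
      have hcarry' : 0 ≤ (f * dval d + carry) / 10 := by omega
      rw [ih (by simp) (fun c hcm => hg c (by simp [hcm])) _ _ _ hcarry'
          (by simp only [List.length_cons] at hiter ⊢; push_cast at hiter ⊢; omega)]
      simp [resF, List.append_assoc]

theorem resF_val (f : Int) :
    ∀ (ds : List Char), ds ≠ [] →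
    ∀ (c : Int),
    (resF f ds c).foldl (fun a d => 10 * a + d) 0 = f * valLE ds + c := by
  intro ds
  induction ds with
  | nil => intro h; exact absurd rfl h
  | cons d rest ih =>
    intro _ c
    rcases rest with _ | ⟨e, t⟩
    · simp only [resF, List.foldl_cons, List.foldl_nil, valLE]
      ring
    · have hdiv : 10 * ((f * dval d + c) / 10) + (f * dval d + c) % 10 = f * dval d + c := by
        omega
      calc (resF f (d :: e :: t) c).foldl (fun a d => 10 * a + d) 0
          = 10 * ((resF f (e :: t) ((f * dval d + c) / 10)).foldl (fun a d => 10 * a + d) 0)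
            + (f * dval d + c) % 10 := by
            simp only [resF, List.foldl_append, List.foldl_cons, List.foldl_nil]
        _ = 10 * (f * valLE (e :: t) + (f * dval d + c) / 10) + (f * dval d + c) % 10 := by
            rw [ih (by simp) ((f * dval d + c) / 10)]
        _ = f * valLE (d :: e :: t) + c := by
            simp only [valLE]
            linear_combination hdiv

theorem resF_shape (f : Int) (hf : 0 ≤ f) :
    ∀ (ds : List Char), ds ≠ [] → (∀ c ∈ ds, ∃ k, k < 10 ∧ c = Nat.digitChar k) →
    ∀ (c : Int), 0 ≤ c →
    ∃ D rest', resF f ds c = D :: rest' ∧ 0 ≤ D ∧ ∀ x ∈ rest', 0 ≤ x ∧ x < 10 := by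
  intro ds
  induction ds with
  | nil => intro h; exact absurd rfl h
  | cons d rest ih =>
    intro _ hg c hc
    have hdv : 0 ≤ dval d ∧ dval d < 10 := by
      obtain ⟨k, hk, rfl⟩ := hg d (by simp)
      rw [dval_digitChar k hk]
      constructor <;> [positivity; exact_mod_cast hk]
    have htemp : 0 ≤ f * dval d := mul_nonneg hf hdv.1
    rcases rest with _ | ⟨e, t⟩
    · exact ⟨f * dval d + c, [], by simp [resF], by omega, by simp⟩
    · obtain ⟨D, rest', hr, hD, hb⟩ :=
        ih (by simp) (fun x hx => hg x (by simp [hx])) ((f * dval d + c) / 10) (by omega)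
      refine ⟨D, rest' ++ [(f * dval d + c) % 10], ?_, hD, ?_⟩
      · simp [resF, hr]
      · intro x hx
        rcases List.mem_append.mp hx with hx | hx
        · exact hb x hx
        · simp at hx
          subst hx
          constructor <;> omega

theorem toChars_single (d : Int) (h0 : 0 ≤ d) (h10 : d < 10) :
    PySem.Int.toChars d = [Nat.digitChar d.toNat] := by
  rw [toChars_nonneg d h0, rep10]
  simp [show d.toNat < 10 by omega]

theorem pyInt_append (A B : List Char) :
    pyIntOfDigits (A ++ B) = pyIntOfDigits A * 10 ^ B.length + pyIntOfDigits B := by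
  simp only [pyIntOfDigits, List.foldl_append]
  exact foldl_digit_shift _ B _

theorem join_singletons (rest : List Int) (hr : ∀ x ∈ rest, 0 ≤ x ∧ x < 10) :
    PySem.Chars.join [] (rest.map PySem.Int.toChars)
      = rest.map (fun d => Nat.digitChar d.toNat) := by
  have hmap : rest.map PySem.Int.toChars
      = (rest.map (fun d => Nat.digitChar d.toNat)).map (fun c => [c]) := by
    rw [List.map_map]
    apply List.map_congr_left
    intro d hd
    exact toChars_single d (hr d hd).1 (hr d hd).2
  rw [hmap]
  exact PySem.Chars.join_nil_singletons _

theorem pyInt_join_value (D : Int) (hD : 0 ≤ D) (rest : List Int)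
    (hr : ∀ x ∈ rest, 0 ≤ x ∧ x < 10) :
    pyIntOfDigits (PySem.Chars.join [] ((D :: rest).map PySem.Int.toChars))
      = (D :: rest).foldl (fun a d => 10 * a + d) 0 := by
  have hsplit : PySem.Chars.join [] ((D :: rest).map PySem.Int.toChars)
      = PySem.Int.toChars D ++ rest.map (fun d => Nat.digitChar d.toNat) := by
    rcases rest with _ | ⟨e, t⟩
    · simp [PySem.Chars.join_singleton]
    · have h1 : (D :: e :: t).map PySem.Int.toChars
          = PySem.Int.toChars D :: PySem.Int.toChars e :: (t.map PySem.Int.toChars) := rfl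
      rw [h1, PySem.Chars.join_cons_cons]
      have h2 : PySem.Int.toChars e :: (t.map PySem.Int.toChars)
          = (e :: t).map PySem.Int.toChars := rfl
      rw [h2, join_singletons (e :: t) hr]
      simp
  rw [hsplit, pyInt_append]
  have hD' : pyIntOfDigits (PySem.Int.toChars D) = D := by
    rw [toChars_nonneg D hD, pyInt_rep10]
    omega
  have htail : pyIntOfDigits (rest.map (fun d => Nat.digitChar d.toNat))
      = rest.foldl (fun a d => 10 * a + d) 0 := by
    simp only [pyIntOfDigits, List.foldl_map]
    apply PySem.List.foldl_congr_mem'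
    intro x hx a
    rw [toNat_digitChar x.toNat (by have := hr x hx; omega)]
    have := (hr x hx).1
    push_cast
    omega
  rw [hD', htail]
  simp only [List.foldl_cons, List.length_map]
  rw [foldl_digit_shift (fun d : Int => d) rest (10 * 0 + D)]
  ring

theorem mult_eq (cur f : Int) (hc : 0 ≤ cur) (hf : 0 ≤ f) :
    multiplicationP cur f = cur * f := by
  rw [multiplicationP_eq, PySem.List.slice?_none_none_neg_one]
  simp only [Option.getD_some]
  have hdig : PySem.Int.toChars cur = rep10 cur.toNat := toChars_nonneg cur hc
  have hne : (PySem.Int.toChars cur).reverse ≠ [] := by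
    rw [hdig]; simp [rep10_ne_nil cur.toNat]
  have hgood : ∀ c ∈ (PySem.Int.toChars cur).reverse, ∃ k, k < 10 ∧ c = Nat.digitChar k := by
    intro c hcm
    rw [hdig] at hcm
    exact rep10_good cur.toNat c (List.mem_reverse.mp hcm)
  have hK : (0 : Int) = PySem.Chars.len (PySem.Int.toChars cur)
      - (((PySem.Int.toChars cur).reverse.length : Nat) : Int) := by
    rw [PySem.Chars.len_eq]
    simp
  rw [loop_eq f _ hf _ hne hgood [] 0 0 le_rfl hK]
  simp only [List.append_nil]
  obtain ⟨D, rest', hres, hD, hb⟩ := resF_shape f hf _ hne hgood 0 le_rfl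
  have hval := resF_val f _ hne 0
  rw [hres, pyInt_join_value D hD rest' hb, ← hres, hval]
  have hle : valLE (PySem.Int.toChars cur).reverse = (cur.toNat : Int) := by
    rw [hdig]; exact valLE_reverse_rep10 cur.toNat
  rw [hle]
  have hcn : (cur.toNat : Int) = cur := by omega
  rw [hcn]
  ring

theorem calcWhile_eq (base power : Int) (hb : 0 ≤ base) :
    ∀ (k : Nat) (n cur : Int), (power + 1 - n).toNat = k → 0 ≤ cur →
    calcWhile base power cur n = cur * base ^ k := by
  intro k
  induction k with
  | zero =>
    intro n cur hk hcur
    rw [calcWhile]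
    split
    · omega
    · simp
  | succ k ih =>
    intro n cur hk hcur
    rw [calcWhile]
    split
    · next h =>
      rw [mult_eq cur base hcur hb]
      rw [ih (n + 1) (cur * base) (by omega) (mul_nonneg hcur hb)]
      rw [pow_succ]
      ring
    · omega

theorem powLoop_eq : ∀ (k : Nat) (r b p : Int), p.toNat ≤ k → 0 ≤ p →
    powLoop r b p = r * b ^ p.toNat := by
  intro k
  induction k with
  | zero =>
    intro r b p hk hp
    rw [powLoop]
    split
    · omega
    · have h0 : p.toNat = 0 := by omega
      simp [h0]
  | succ k ih =>
    intro r b p hk hp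
    rw [powLoop]
    split
    · next h =>
      rw [PySem.Int.mod_eq_emod_of_pos (by omega), PySem.Int.floordiv_eq_ediv_of_pos (by omega)]
      rw [ih _ _ _ (by omega) (by omega)]
      have hbb : (b * b) ^ (p / 2).toNat = b ^ (2 * (p / 2).toNat) := by
        rw [two_mul, pow_add]; ring
      by_cases hodd : p % 2 = 1
      · rw [if_pos hodd, hbb]
        have hpt : p.toNat = 2 * (p / 2).toNat + 1 := by omega
        rw [hpt, pow_succ]
        ring
      · rw [if_neg hodd, hbb]
        have hpt : p.toNat = 2 * (p / 2).toNat := by omega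
        rw [hpt]
    · have h0 : p.toNat = 0 := by omega
      simp [h0]

-- ===== VERDICT (by name: the statement is the Claim_ definition above) =====
theorem calculate_nthPower_spec : Claim_equal_calculate_nthPower := by
  unfold Claim_equal_calculate_nthPower
  intro base power _ hpre
  unfold Spec_calculate_nthPower calculate_nthPower calculate_nthPower_alt
  by_cases h0 : power = 0
  · simp [h0]
  · by_cases h1 : power = 1
    · simp [h1]
    · by_cases h2 : power < 2
      · rw [if_neg h0, if_neg h1, if_neg h0, if_pos h2]
        rw [calcWhile]
        rw [dif_neg (by omega)]
      · have hb : 0 ≤ base := by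
          rcases hpre with h | h
          · omega
          · exact h
        rw [if_neg h0, if_neg h1, if_neg h0, if_neg h2]
        rw [calcWhile_eq base power hb (power - 1).toNat 2 base (by omega) hb]
        rw [powLoop_eq power.toNat 1 base power le_rfl (by omega)]
        have hpt : power.toNat = (power - 1).toNat + 1 := by omega
        rw [hpt, pow_succ]
        ring
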